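-- pv_equiv track=rewrite | github.com/microsoft/snmalloc | prototype/index_table.py | gen_size_classes
-- ===== SOURCE A (Python) =====
-- B = 2  # intermediate bits
--
-- def gen_size_classes(max_size):
--     """Generate all valid size classes up to max_size with B=2."""
--     classes = set()
--     # e=0: S = 1
--     # e=1: S = 2, 3
--     # e>=2: S = 2^e + m * 2^(e-2) for m in 0..3
--     classes.add(1)
--     classes.add(2)
--     classes.add(3)
--     e = 2
--     while True:
--         base = 1 << e
--         step = 1 << (e - B)
--         for m in range(1 << B):
--             s = base + m * step
--             if s > max_size:
--                 break
--             classes.add(s)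
--         if base > max_size:
--             break
--         e += 1
--     return sorted(classes)
-- ===== SOURCE B (Python) =====
-- def gen_size_classes(max_size):
--     """Generate all valid size classes up to max_size with B=2."""
--     out = [1, 2, 3]
--     j = 0
--     while (4 + j % 4) << (j // 4) <= max_size:
--         out.append((4 + j % 4) << (j // 4))
--         j += 1
--     return out
-- ===== Notes on version B (the rewrite author's own statement) =====
-- stated objective: alternative
-- what changed: Instead of accumulating a set over nested exponent/mantissa loops and sorting it, B emits the sorted list directly with a single index counter j whose closed-form j-th class is (4 + j%4) << (j//4), so no set and no sort are needed.
import Mathlib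
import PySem

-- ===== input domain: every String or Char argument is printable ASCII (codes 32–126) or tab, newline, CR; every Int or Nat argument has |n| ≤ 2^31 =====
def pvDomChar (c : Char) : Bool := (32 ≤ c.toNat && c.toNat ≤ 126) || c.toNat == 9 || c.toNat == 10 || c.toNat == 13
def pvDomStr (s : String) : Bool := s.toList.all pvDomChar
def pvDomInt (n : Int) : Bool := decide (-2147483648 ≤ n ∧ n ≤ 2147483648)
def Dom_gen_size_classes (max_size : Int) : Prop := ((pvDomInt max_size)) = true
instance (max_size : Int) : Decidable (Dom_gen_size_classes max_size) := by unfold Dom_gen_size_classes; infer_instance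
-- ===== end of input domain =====

-- B emits the sorted class list directly from a closed-form index formula (no set, no
-- sort) instead of A's nested exponent/mantissa loops over a set; objective: alternative.

-- ===== PORT A =====
-- module constant B = 2 (named pvBconst here to avoid clashing with a type name)
def pvBconst : Nat := 2

-- the inner 'for m in range(1 << B): s = base + m*step; if s > max_size: break; classes.add(s)'
def aInner (max_size base step : Int) : List Int → PySem.Set Int → PySem.Set Int
  | [], classes => classes
  | m :: rest, classes =>
    if base + m * step > max_size then classes
    else aInner max_size base step rest (PySem.Set.add classes (base + m * step))

-- the outer 'while True' loop; terminates because base = 1 << e eventually exceeds max_size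
def aLoop (max_size : Int) (e : Nat) (classes : PySem.Set Int) : PySem.Set Int :=
  let classes' := aInner max_size ((1:Int) <<< e) ((1:Int) <<< (e - pvBconst))
                    (PySem.List.pyRange 0 ((1:Int) <<< pvBconst) 1) classes
  if ((1:Int) <<< e) > max_size then classes'
  else aLoop max_size (e + 1) classes'
termination_by (max_size + 1 - (1:Int) <<< e).toNat
decreasing_by
  have h1 : (0:Int) < 2 ^ e := by positivity
  simp only [Int.shiftLeft_eq, one_mul, pow_succ] at *
  omega

def gen_size_classes (max_size : Int) : List Int :=
  let classes := PySem.Set.add (PySem.Set.add (PySem.Set.add PySem.Set.empty 1) 2) 3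
  PySem.List.sorted (aLoop max_size 2 classes) (fun x => x) false

-- ===== PORT B =====
-- the closed-form j-th class '(4 + j % 4) << (j // 4)' of Source B
def bVal (j : Nat) : Int := ((4:Int) + (j % 4 : Nat)) <<< (j / 4)

-- bVal is strictly increasing; needed by bLoop's termination, so it stays above the port
lemma bVal_lt (j : Nat) : bVal j < bVal (j + 1) := by
  have hq : (j + 1) / 4 = if j % 4 = 3 then j / 4 + 1 else j / 4 := by split <;> omega
  have hr : (j + 1) % 4 = if j % 4 = 3 then 0 else j % 4 + 1 := by split <;> omega
  have ht : (0:Int) < 2 ^ (j / 4) := by positivity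
  by_cases h3 : j % 4 = 3 <;>
    simp only [bVal, Int.shiftLeft_eq, hq, hr, h3, if_true, if_false, pow_succ] <;>
    push_cast <;> nlinarith [ht, Nat.mod_lt j (show 0 < 4 by omega)]

-- 'while (4 + j%4) << (j//4) <= max_size: out.append(...); j += 1'
def bLoop (max_size : Int) (j : Nat) : List Int :=
  if h : bVal j ≤ max_size then bVal j :: bLoop max_size (j + 1) else []
termination_by (max_size + 1 - bVal j).toNat
decreasing_by
  have := bVal_lt j
  omega

def gen_size_classes_alt (max_size : Int) : List Int :=
  [1, 2, 3] ++ bLoop max_size 0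

-- ===== PRECONDITION & SPEC =====
def Spec_gen_size_classes (max_size : Int) (out : List Int) : Prop := out = gen_size_classes_alt max_size
instance (max_size : Int) (out : List Int) : Decidable (Spec_gen_size_classes max_size out) := by unfold Spec_gen_size_classes; infer_instance

-- ===== CLAIM (what is proved, stated in full; the proofs are below) =====
def Claim_equal_gen_size_classes : Prop := ∀ (max_size : Int), Dom_gen_size_classes max_size → Spec_gen_size_classes max_size (gen_size_classes max_size)

-- ===== LEMMAS AND PROOFS =====

-- the valid classes ≥ 4 with exponent at least k
def PCls (k : Nat) (y : Int) : Prop := ∃ q m : Nat, k ≤ q ∧ m < 4 ∧ y = (4 + (m:Int)) * 2 ^ q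

lemma aInner_nodup (max_size base step : Int) (ms : List Int) (cls : PySem.Set Int)
    (h : cls.Nodup) : (aInner max_size base step ms cls).Nodup := by
  induction ms generalizing cls with
  | nil => simpa [aInner] using h
  | cons m rest ih =>
    simp only [aInner]
    split
    · exact h
    · exact ih _ (PySem.Set.nodup_add _ _ h)

lemma aLoop_nodup (max_size : Int) (e : Nat) (cls : PySem.Set Int)
    (h : cls.Nodup) : (aLoop max_size e cls).Nodup := by
  rw [aLoop]
  split
  · exact aInner_nodup _ _ _ _ _ h
  · exact aLoop_nodup _ _ _ (aInner_nodup _ _ _ _ _ h)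
termination_by (max_size + 1 - (1:Int) <<< e).toNat
decreasing_by
  have h1 : (0:Int) < 2 ^ e := by positivity
  simp only [Int.shiftLeft_eq, one_mul, pow_succ] at *
  omega

lemma aInner4 (max_size t : Int) (ht : 0 < t) (cls : PySem.Set Int) (y : Int) :
    y ∈ aInner max_size (4 * t) t [0, 1, 2, 3] cls ↔
      y ∈ cls ∨ (y ∈ [4 * t, 5 * t, 6 * t, 7 * t] ∧ y ≤ max_size) := by
  simp only [aInner]
  by_cases hP : y ∈ cls <;>
    split_ifs <;>
    simp only [PySem.Set.mem_add, List.mem_cons, List.not_mem_nil, or_false, hP,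
      true_or, false_or, false_iff] <;>
    omega

lemma aLoop_mem (max_size : Int) (k : Nat) (cls : PySem.Set Int) (y : Int) :
    y ∈ aLoop max_size (k + 2) cls ↔ y ∈ cls ∨ (PCls k y ∧ y ≤ max_size) := by
  have ht : (0:Int) < 2 ^ k := by positivity
  have hsh : ((1:Int) <<< (k + 2)) = 4 * 2 ^ k := by
    rw [Int.shiftLeft_eq]; ring
  have hstep : ((1:Int) <<< (k + 2 - pvBconst)) = 2 ^ k := by
    simp [pvBconst, Int.shiftLeft_eq]
  have hrange : PySem.List.pyRange 0 ((1:Int) <<< pvBconst) 1 = [0, 1, 2, 3] := by decide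
  have hgroup : ∀ m : Nat, m < 4 → (4 + (m:Int)) * 2 ^ k ∈ [4 * (2:Int) ^ k, 5 * 2 ^ k, 6 * 2 ^ k, 7 * 2 ^ k] := by
    intro m hm
    interval_cases m <;> simp
  have hlow : ∀ z, PCls k z → 4 * 2 ^ k ≤ z := by
    rintro z ⟨q, m, hkq, hm, rfl⟩
    have h1 : (2:Int) ^ k ≤ 2 ^ q := pow_le_pow_right₀ (by omega) hkq
    have h2 : (4:Int) ≤ 4 + (m:Int) := by omega
    nlinarith
  rw [aLoop]
  simp only [hsh, hstep, hrange]
  by_cases hc : 4 * (2:Int) ^ k ≤ max_size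
  · rw [if_neg (by omega)]
    rw [aLoop_mem max_size (k + 1) _ y]
    rw [aInner4 _ _ ht]
    constructor
    · rintro ((h | ⟨hm, hy⟩) | ⟨hP, hy⟩)
      · exact Or.inl h
      · refine Or.inr ⟨?_, hy⟩
        simp only [List.mem_cons, List.not_mem_nil, or_false] at hm
        rcases hm with rfl | rfl | rfl | rfl
        · exact ⟨k, 0, le_refl _, by omega, by push_cast; ring⟩
        · exact ⟨k, 1, le_refl _, by omega, by push_cast; ring⟩
        · exact ⟨k, 2, le_refl _, by omega, by push_cast; ring⟩
        · exact ⟨k, 3, le_refl _, by omega, by push_cast; ring⟩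
      · obtain ⟨q, m, hkq, hm, rfl⟩ := hP
        exact Or.inr ⟨⟨q, m, by omega, hm, rfl⟩, hy⟩
    · rintro (h | ⟨⟨q, m, hkq, hm, rfl⟩, hy⟩)
      · exact Or.inl (Or.inl h)
      · rcases Nat.eq_or_lt_of_le hkq with rfl | hq
        · exact Or.inl (Or.inr ⟨hgroup m hm, hy⟩)
        · exact Or.inr ⟨⟨q, m, by omega, hm, rfl⟩, hy⟩
  · rw [if_pos (by omega)]
    rw [aInner4 _ _ ht]
    constructor
    · rintro (h | ⟨hm, hy⟩)
      · exact Or.inl h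
      · simp only [List.mem_cons, List.not_mem_nil, or_false] at hm
        rcases hm with rfl | rfl | rfl | rfl <;> linarith
    · rintro (h | ⟨hP, hy⟩)
      · exact Or.inl h
      · exact absurd hy (by have := hlow y hP; omega)
termination_by (max_size + 1 - 4 * 2 ^ k).toNat
decreasing_by
  simp only [pow_succ]
  omega

lemma bVal_mono {i j : Nat} (h : i ≤ j) : bVal i ≤ bVal j := by
  induction j with
  | zero => simp [Nat.le_zero.mp h]
  | succ n ih =>
    rcases Nat.lt_or_ge i (n + 1) with h' | h'
    · exact le_trans (ih (by omega)) (le_of_lt (bVal_lt n))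
    · have : i = n + 1 := by omega
      subst this; exact le_refl _

lemma bVal_eq_pow (j : Nat) : bVal j = (4 + ((j % 4 : Nat) : Int)) * 2 ^ (j / 4) := by
  simp [bVal, Int.shiftLeft_eq]

lemma bLoop_mem (max_size : Int) (j : Nat) (y : Int) :
    y ∈ bLoop max_size j ↔ ∃ j', j ≤ j' ∧ bVal j' = y ∧ y ≤ max_size := by
  rw [bLoop]
  split
  · rename_i h
    rw [List.mem_cons, bLoop_mem max_size (j + 1) y]
    constructor
    · rintro (rfl | ⟨j', hj, rfl, hy⟩)
      · exact ⟨j, le_refl _, rfl, h⟩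
      · exact ⟨j', by omega, rfl, hy⟩
    · rintro ⟨j', hj, rfl, hy⟩
      rcases Nat.eq_or_lt_of_le hj with rfl | hj'
      · exact Or.inl rfl
      · exact Or.inr ⟨j', by omega, rfl, hy⟩
  · rename_i h
    simp only [List.not_mem_nil, false_iff]
    rintro ⟨j', hj, rfl, hy⟩
    exact h (le_trans (bVal_mono hj) hy)
termination_by (max_size + 1 - bVal j).toNat
decreasing_by
  have := bVal_lt j
  omega

lemma bLoop_lb (max_size : Int) (j : Nat) : ∀ y ∈ bLoop max_size j, bVal j ≤ y := by
  intro y hy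
  obtain ⟨j', hj, rfl, _⟩ := (bLoop_mem max_size j y).mp hy
  exact bVal_mono hj

lemma bLoop_pairwise (max_size : Int) (j : Nat) :
    (bLoop max_size j).Pairwise (· < ·) := by
  rw [bLoop]
  split
  · refine List.Pairwise.cons ?_ (bLoop_pairwise max_size (j + 1))
    intro y hy
    exact lt_of_lt_of_le (bVal_lt j) (bLoop_lb max_size (j + 1) y hy)
  · exact List.Pairwise.nil
termination_by (max_size + 1 - bVal j).toNat
decreasing_by
  have := bVal_lt j
  omega

lemma exists_bVal_iff (y : Int) : (∃ j : Nat, bVal j = y) ↔ PCls 0 y := by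
  constructor
  · rintro ⟨j, rfl⟩
    exact ⟨j / 4, j % 4, Nat.zero_le _, by omega, bVal_eq_pow j⟩
  · rintro ⟨q, m, _, hm, rfl⟩
    refine ⟨4 * q + m, ?_⟩
    rw [bVal_eq_pow]
    have h1 : (4 * q + m) % 4 = m := by omega
    have h2 : (4 * q + m) / 4 = q := by omega
    rw [h1, h2]

lemma alt_pairwise (max_size : Int) :
    (gen_size_classes_alt max_size).Pairwise (· < ·) := by
  unfold gen_size_classes_alt
  rw [List.pairwise_append]
  refine ⟨by decide, bLoop_pairwise max_size 0, ?_⟩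
  intro x hx y hy
  have h4 : bVal 0 ≤ y := bLoop_lb max_size 0 y hy
  have : bVal 0 = 4 := by decide
  simp only [List.mem_cons, List.not_mem_nil, or_false] at hx
  rcases hx with rfl | rfl | rfl <;> omega

lemma alt_mem (max_size : Int) (y : Int) :
    y ∈ gen_size_classes_alt max_size ↔
      y ∈ ([1, 2, 3] : List Int) ∨ (PCls 0 y ∧ y ≤ max_size) := by
  unfold gen_size_classes_alt
  rw [List.mem_append, bLoop_mem]
  constructor
  · rintro (h | ⟨j, _, rfl, hy⟩)
    · exact Or.inl h
    · exact Or.inr ⟨(exists_bVal_iff _).mp ⟨j, rfl⟩, hy⟩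
  · rintro (h | ⟨hP, hy⟩)
    · exact Or.inl h
    · obtain ⟨j, rfl⟩ := (exists_bVal_iff _).mpr hP
      exact Or.inr ⟨j, Nat.zero_le _, rfl, hy⟩

-- ===== VERDICT (by name: the statement is the Claim_ definition above) =====
theorem gen_size_classes_spec : Claim_equal_gen_size_classes := by
  intro max_size _hdom
  unfold Spec_gen_size_classes gen_size_classes
  have h0A : (PySem.Set.add (PySem.Set.add (PySem.Set.add PySem.Set.empty 1) 2) 3
      : PySem.Set Int) = [1, 2, 3] := by decide
  simp only [h0A]
  have hA : (aLoop max_size 2 ([1, 2, 3] : PySem.Set Int)).Nodup :=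
    aLoop_nodup _ _ _ (by decide)
  have hB : (gen_size_classes_alt max_size).Nodup :=
    (alt_pairwise max_size).imp (fun h => ne_of_lt h)
  have hmem : ∀ y, y ∈ gen_size_classes_alt max_size ↔
      y ∈ aLoop max_size 2 ([1, 2, 3] : PySem.Set Int) := by
    intro y
    rw [alt_mem, show (2:Nat) = 0 + 2 from rfl, aLoop_mem]
  have hperm : (gen_size_classes_alt max_size).Perm
      (aLoop max_size 2 ([1, 2, 3] : PySem.Set Int)) :=
    (List.perm_ext_iff_of_nodup hB hA).mpr hmem
  exact PySem.List.sorted_eq_of_perm_of_pairwise_lt _ _ _ hperm (alt_pairwise max_size)
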